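-- pv_equiv track=rewrite | github.com/SyedMohammedSameer/ShifaMind | demo_analysis.py | extract_clinical_keywords
-- ===== SOURCE A (Python) =====
-- def extract_clinical_keywords(text):
--     """Simple keyword extraction - will be enhanced with ClinicalBERT"""
--     # Medical terms commonly found in clinical notes
--     clinical_patterns = [
--         'fever', 'cough', 'dyspnea', 'pneumonia', 'infection', 'sepsis',
--         'hypotension', 'tachycardia', 'edema', 'crackles', 'infiltrate',
--         'bacteremia', 'heart failure', 'cardiomyopathy', 'congestion',
--         'shock', 'lactate', 'SIRS', 'hypoxemia', 'respiratory',
--         'pulmonary', 'cardiac', 'ventricular', 'ejection fraction'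
--     ]
--
--     text_lower = text.lower()
--     found_keywords = []
--
--     for keyword in clinical_patterns:
--         if keyword.lower() in text_lower:
--             # Find context (sentence containing keyword)
--             sentences = text.split('.')
--             for sent in sentences:
--                 if keyword.lower() in sent.lower():
--                     found_keywords.append({
--                         'keyword': keyword,
--                         'context': sent.strip()[:100]
--                     })
--                     break
--
--     return found_keywords
-- ===== SOURCE B (Python) =====
-- def extract_clinical_keywords(text):
--     """Single pass over sentences: index contexts by keyword, then emit in pattern order."""
--     clinical_patterns = [
--         'fever', 'cough', 'dyspnea', 'pneumonia', 'infection', 'sepsis',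
--         'hypotension', 'tachycardia', 'edema', 'crackles', 'infiltrate',
--         'bacteremia', 'heart failure', 'cardiomyopathy', 'congestion',
--         'shock', 'lactate', 'SIRS', 'hypoxemia', 'respiratory',
--         'pulmonary', 'cardiac', 'ventricular', 'ejection fraction'
--     ]
--
--     sentences = text.split('.')
--     found = {}
--     for sent in sentences:
--         sent_lower = sent.lower()
--         for keyword in clinical_patterns:
--             if keyword not in found and keyword.lower() in sent_lower:
--                 found[keyword] = sent.strip()[:100]
--
--     return [{'keyword': kw, 'context': found[kw]} for kw in clinical_patterns if kw in found]
-- ===== Notes on version B (the rewrite author's own statement) =====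
-- stated objective: alternative
-- what changed: Inverts the loop nesting: splits the text into sentences once and makes a single in-order pass over sentences recording the first matching context per keyword in a dict, then emits results in clinical_patterns order, instead of re-splitting the text and rescanning all sentences for every keyword.
import Mathlib
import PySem

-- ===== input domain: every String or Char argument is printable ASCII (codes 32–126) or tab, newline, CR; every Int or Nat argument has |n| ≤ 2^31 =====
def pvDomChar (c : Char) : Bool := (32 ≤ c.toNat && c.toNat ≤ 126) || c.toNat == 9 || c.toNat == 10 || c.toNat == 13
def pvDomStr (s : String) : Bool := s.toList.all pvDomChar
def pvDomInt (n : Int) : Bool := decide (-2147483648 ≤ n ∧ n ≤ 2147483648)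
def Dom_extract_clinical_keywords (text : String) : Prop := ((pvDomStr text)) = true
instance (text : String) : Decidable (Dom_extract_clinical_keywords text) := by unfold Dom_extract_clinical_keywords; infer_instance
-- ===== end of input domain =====

-- B inverts A's loop nesting: one split and one in-order pass over sentences building a
-- keyword→context dict, then a separate emit pass in pattern order (alternative decomposition).

-- The module-level constant list both Pythons contain verbatim.
def pvClinicalPatterns : List String :=
  ["fever", "cough", "dyspnea", "pneumonia", "infection", "sepsis",
   "hypotension", "tachycardia", "edema", "crackles", "infiltrate",
   "bacteremia", "heart failure", "cardiomyopathy", "congestion",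
   "shock", "lactate", "SIRS", "hypoxemia", "respiratory",
   "pulmonary", "cardiac", "ventricular", "ejection fraction"]

-- sent.strip()[:100]  (shared subexpression of both Pythons)
def pvCtx (s : List Char) : String :=
  String.ofList (PySem.Chars.slice (PySem.Chars.strip s) none (some 100))

-- ===== PORT A =====
-- A's inner 'for sent in sentences: … break' loop: first matching sentence yields the entry.
def aFindCtx (kw : String) : List (List Char) → List (List (String × String))
  | [] => []
  | s :: rest =>
    if PySem.Chars.isIn (PySem.Chars.lower kw.toList) (PySem.Chars.lower s) then
      [[("keyword", kw), ("context", pvCtx s)]]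
    else aFindCtx kw rest

def extract_clinical_keywords (text : String) : List (List (String × String)) :=
  let textLower := PySem.Chars.lower text.toList
  pvClinicalPatterns.foldl (fun acc kw =>
    if PySem.Chars.isIn (PySem.Chars.lower kw.toList) textLower then
      -- sentences = text.split('.')  (recomputed per keyword, as in A)
      acc ++ aFindCtx kw (PySem.Chars.splitOn text.toList ['.'])
    else acc) []

-- ===== PORT B =====
-- one sentence: 'for keyword in clinical_patterns: if keyword not in found and …: found[keyword] = …'
def bRecord (s : List Char) (found : PySem.Dict String String) : PySem.Dict String String :=
  let sentLower := PySem.Chars.lower s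
  pvClinicalPatterns.foldl (fun d kw =>
    if !d.contains kw && PySem.Chars.isIn (PySem.Chars.lower kw.toList) sentLower then
      d.insert kw (pvCtx s)
    else d) found

def extract_clinical_keywords_alt (text : String) : List (List (String × String)) :=
  let sentences := PySem.Chars.splitOn text.toList ['.']
  let found := sentences.foldl (fun d s => bRecord s d) PySem.Dict.empty
  pvClinicalPatterns.foldl (fun acc kw =>
    match found.get? kw with
    | some c => acc ++ [[("keyword", kw), ("context", c)]]
    | none => acc) []

-- ===== PRECONDITION & SPEC =====
def Spec_extract_clinical_keywords (text : String) (out : List (List (String × String))) : Prop := out = extract_clinical_keywords_alt text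
instance (text : String) (out : List (List (String × String))) : Decidable (Spec_extract_clinical_keywords text out) := by unfold Spec_extract_clinical_keywords; infer_instance

-- ===== CLAIM (what is proved, stated in full; the proofs are below) =====
def Claim_equal_extract_clinical_keywords : Prop := ∀ (text : String), Dom_extract_clinical_keywords text → Spec_extract_clinical_keywords text (extract_clinical_keywords text)

-- ===== LEMMAS AND PROOFS =====

-- every segment splitOn.go emits is in acc or an infix of cur.reverse ++ l
theorem pv_go_mem_infix (sep : List Char) : ∀ (fuel : Nat) (l cur : List Char) (acc : List (List Char)),
    ∀ seg ∈ PySem.Chars.splitOn.go sep fuel l cur acc, seg ∈ acc ∨ seg <:+: cur.reverse ++ l := by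
  intro fuel
  induction fuel with
  | zero =>
    intro l cur acc seg hseg
    simp [PySem.Chars.splitOn.go] at hseg
    rcases hseg with h | h
    · exact Or.inl h
    · exact Or.inr (h ▸ List.infix_rfl)
  | succ n ih =>
    intro l cur acc seg hseg
    match l with
    | [] =>
      simp [PySem.Chars.splitOn.go] at hseg
      rcases hseg with h | h
      · exact Or.inl h
      · subst h; exact Or.inr ⟨[], [], by simp⟩
    | c :: rest =>
      rw [PySem.Chars.splitOn.go] at hseg
      split at hseg
      · rcases ih _ [] _ seg hseg with h | h
        · rcases List.mem_cons.mp h with h1 | h1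
          · subst h1
            exact Or.inr ⟨[], c :: rest, by simp⟩
          · exact Or.inl h1
        · refine Or.inr (List.IsInfix.trans (by simpa using h) ?_)
          exact ⟨cur.reverse ++ List.take sep.length (c :: rest), [], by simp⟩
      · rcases ih rest (c :: cur) acc seg hseg with h | h
        · exact Or.inl h
        · exact Or.inr (by simpa using h)

theorem pv_mem_splitOn_infix {s : List Char} {sep : List Char} {seg : List Char}
    (h : seg ∈ PySem.Chars.splitOn s sep) : seg <:+: s := by
  rcases pv_go_mem_infix sep (s.length + 1) s [] [] seg h with h' | h'
  · exact absurd h' (List.not_mem_nil)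
  · simpa using h'

-- a keyword matching a sentence of text matches text itself
theorem pv_match_text {text : String} {s : List Char} {kw : String}
    (hs : s ∈ PySem.Chars.splitOn text.toList ['.'])
    (hm : PySem.Chars.isIn (PySem.Chars.lower kw.toList) (PySem.Chars.lower s) = true) :
    PySem.Chars.isIn (PySem.Chars.lower kw.toList) (PySem.Chars.lower text.toList) = true := by
  rw [PySem.Chars.isIn_iff_infix] at hm ⊢
  exact hm.trans (by simpa [PySem.Chars.lower] using List.IsInfix.map PySem.Chars.lowerChar (pv_mem_splitOn_infix hs))

-- aFindCtx is the first matching sentence, as a find?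
theorem pv_aFindCtx_eq (kw : String) (ss : List (List Char)) :
    aFindCtx kw ss =
      match ss.find? (fun s => PySem.Chars.isIn (PySem.Chars.lower kw.toList) (PySem.Chars.lower s)) with
      | some s => [[("keyword", kw), ("context", pvCtx s)]]
      | none => [] := by
  induction ss with
  | nil => rfl
  | cons s rest ih =>
    rw [List.find?_cons]
    cases h : PySem.Chars.isIn (PySem.Chars.lower kw.toList) (PySem.Chars.lower s) with
    | true => simp [aFindCtx, h]
    | false => simpa [aFindCtx, h] using ih

theorem pv_contains_eq_isSome {d : PySem.Dict String String} {k : String} :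
    d.contains k = (d.get? k).isSome := by
  simp [PySem.Dict.contains, PySem.Dict.get?, List.isSome_find?]

-- dict lookups are untouched by a keyword loop that never visits the key
theorem pv_bInner_not_mem {s : List Char} {kw : String} :
    ∀ (ks : List String) (d : PySem.Dict String String), kw ∉ ks →
    ((ks.foldl (fun d k => if !d.contains k && PySem.Chars.isIn (PySem.Chars.lower k.toList) (PySem.Chars.lower s) then d.insert k (pvCtx s) else d) d).get? kw) = d.get? kw := by
  intro ks
  induction ks with
  | nil => intro d _; rfl
  | cons k rest ih =>
    intro d hmem
    rw [List.foldl_cons]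
    rw [ih _ (fun h => hmem (List.mem_cons_of_mem _ h))]
    split
    · exact PySem.Dict.get?_insert_of_ne d _ (fun h => hmem (h ▸ List.mem_cons_self))
    · rfl

-- lookup after one sentence's keyword loop
theorem pv_bInner_get? {s : List Char} {kw : String} :
    ∀ (ks : List String) (d : PySem.Dict String String), kw ∈ ks → ks.Nodup →
    ((ks.foldl (fun d k => if !d.contains k && PySem.Chars.isIn (PySem.Chars.lower k.toList) (PySem.Chars.lower s) then d.insert k (pvCtx s) else d) d).get? kw) =
      ((d.get? kw).or (if PySem.Chars.isIn (PySem.Chars.lower kw.toList) (PySem.Chars.lower s) then some (pvCtx s) else none)) := by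
  intro ks
  induction ks with
  | nil => intro d h; exact absurd h (List.not_mem_nil)
  | cons k rest ih =>
    intro d hmem hnd
    rw [List.foldl_cons]
    rcases List.mem_cons.mp hmem with heq | hmem'
    · subst heq
      have hnotin : kw ∉ rest := (List.nodup_cons.mp hnd).1
      rw [pv_bInner_not_mem rest _ hnotin]
      rw [pv_contains_eq_isSome]
      cases hd : d.get? kw with
      | some v => simp [hd]
      | none =>
        simp only [Option.isSome_none, Bool.not_false, Bool.true_and, Option.none_or]
        split
        · exact PySem.Dict.get?_insert_self d kw (pvCtx s)
        · exact hd
    · have hne : kw ≠ k := fun h => ((List.nodup_cons.mp hnd).1) (h ▸ hmem')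
      rw [ih _ hmem' (List.nodup_cons.mp hnd).2]
      split
      · rw [PySem.Dict.get?_insert_of_ne d _ hne]
      · rfl

theorem pv_patterns_nodup : pvClinicalPatterns.Nodup := by simp [pvClinicalPatterns]

-- one sentence's bRecord, stated on bRecord itself
theorem pv_bRecord_get? {s : List Char} {kw : String} (hkw : kw ∈ pvClinicalPatterns) {d : PySem.Dict String String} :
    (bRecord s d).get? kw =
      ((d.get? kw).or (if PySem.Chars.isIn (PySem.Chars.lower kw.toList) (PySem.Chars.lower s) then some (pvCtx s) else none)) := by
  unfold bRecord
  exact pv_bInner_get? pvClinicalPatterns d hkw pv_patterns_nodup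

-- lookup after the whole sentence pass: context of the first matching sentence
theorem pv_scan_get? {kw : String} (hkw : kw ∈ pvClinicalPatterns) :
    ∀ (ss : List (List Char)) (d : PySem.Dict String String),
    ((ss.foldl (fun d s => bRecord s d) d).get? kw) =
      ((d.get? kw).or ((ss.find? (fun s => PySem.Chars.isIn (PySem.Chars.lower kw.toList) (PySem.Chars.lower s))).map (fun s => pvCtx s))) := by
  intro ss
  induction ss with
  | nil => intro d; simp
  | cons s rest ih =>
    intro d
    rw [List.foldl_cons, ih]
    rw [pv_bRecord_get? hkw, List.find?_cons]
    cases h : PySem.Chars.isIn (PySem.Chars.lower kw.toList) (PySem.Chars.lower s) with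
    | true => simp
    | false => simp

-- ===== VERDICT (by name: the statement is the Claim_ definition above) =====
theorem extract_clinical_keywords_spec : Claim_equal_extract_clinical_keywords := by
  intro text _
  unfold Spec_extract_clinical_keywords
  unfold extract_clinical_keywords extract_clinical_keywords_alt
  simp only []
  apply PySem.List.foldl_congr_mem
  intro acc kw hkw
  rw [pv_scan_get? hkw (PySem.Chars.splitOn text.toList ['.']) PySem.Dict.empty]
  have hempty : (PySem.Dict.empty : PySem.Dict String String).get? kw = none := rfl
  rw [hempty, Option.none_or, pv_aFindCtx_eq]
  cases hf : (PySem.Chars.splitOn text.toList ['.']).find?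
      (fun s => PySem.Chars.isIn (PySem.Chars.lower kw.toList) (PySem.Chars.lower s)) with
  | none =>
    simp only [Option.map_none]
    split <;> simp
  | some s =>
    have hm := List.find?_some hf
    have hmem := List.mem_of_find?_eq_some hf
    rw [if_pos (pv_match_text hmem hm)]
    rfl
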